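-- pv_equiv track=rewrite | github.com/maniospas/pySynthesis | synthesis/analysis.py | deflatten
-- ===== SOURCE A (Python) =====
-- equality_predicate = " <--> "
--
-- def _is_not_var_symbol(text):
--     valid_symbols = ".,!@#$%^/&*()-+={}[]:\t=<>`'\" "
--     if text in valid_symbols:
--         return True
--     return False
--
-- def _count_strarting_spaces(text, tab=4):
--     count = 0
--     for c in text:
--         if c==' ':
--             count += 1
--         elif c=='\t':
--             count += tab
--         else:
--             break
--     return count
--
-- def _deflatten(expression, variable_expressions):
--     new_expression = ""
--     current_var = ""
--     for c in expression+" ":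
--         if _is_not_var_symbol(c):
--             new_expression += variable_expressions.get(current_var, current_var)
--             current_var = ""
--             new_expression += c
--         else:
--             current_var += c
--     return new_expression[:-1]
--
-- def deflatten(expressions):
--     variable_expressions = {}
--     kept_expressions = list()
--     for expression in expressions:
--         if equality_predicate in expression:
--             splt = expression.split(equality_predicate)
--             variable_expressions[splt[0]] = splt[1]
--         else:
--             kept_expressions.append(expression)
--     kept_expressions = [_deflatten(expression, variable_expressions) for expression in kept_expressions]
--     while True:
--         prev_kept_expressions = kept_expressions
--         kept_expressions = [_deflatten(expression, variable_expressions) for expression in kept_expressions]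
--         diffs = False
--         for i in range(len(kept_expressions)):
--             if prev_kept_expressions[i]!=kept_expressions[i]:
--                 diffs = True
--                 break
--         if not diffs:
--             break
--     spaces = 0
--     for expression in kept_expressions:
--         spaces = _count_strarting_spaces(expression)
--         if spaces>0:
--             break
--     return_statements = list()
--     unique_kept_expressions = list()
--     for expression in kept_expressions:
--         if expression.strip().startswith("return(") and _count_strarting_spaces(expression)==spaces:
--             if not expression.strip()[7:-1] in return_statements:
--                 return_statements.append(expression.strip()[7:-1])
--         elif not expression in unique_kept_expressions:
--             unique_kept_expressions.append(expression)
--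
--     if len(return_statements)>0:
--         unique_kept_expressions.append(" "*spaces+"return "+", ".join(return_statements))
--     return unique_kept_expressions
-- ===== SOURCE B (Python) =====
-- equality_predicate = " <--> "
-- _SYMBOLS = ".,!@#$%^/&*()-+={}[]:\t=<>`'\" "
--
-- def _subst(text, table):
--     parts = []
--     tok = ""
--     for ch in text:
--         if ch in _SYMBOLS:
--             parts.append(table.get(tok, tok))
--             parts.append(ch)
--             tok = ""
--         else:
--             tok += ch
--     parts.append(table.get(tok, tok))
--     return "".join(parts)
--
-- def _expand(text, table):
--     # local fixpoint: substitute this one expression until it is stable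
--     prev = text
--     cur = _subst(prev, table)
--     while cur != prev:
--         prev, cur = cur, _subst(cur, table)
--     return cur
--
-- def _indent(text, tab=4):
--     n = 0
--     for ch in text:
--         if ch == ' ':
--             n += 1
--         elif ch == '\t':
--             n += tab
--         else:
--             return n
--     return n
--
-- def deflatten(expressions):
--     table = {}
--     kept = []
--     for e in expressions:
--         if equality_predicate in e:
--             splt = e.split(equality_predicate)
--             table[splt[0]] = splt[1]
--         else:
--             kept.append(e)
--     kept = [_expand(e, table) for e in kept]
--     spaces = next((n for n in (_indent(e) for e in kept) if n > 0), 0)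
--     returns = {}
--     uniques = {}
--     for e in kept:
--         s = e.strip()
--         if s.startswith("return(") and _indent(e) == spaces:
--             returns.setdefault(s[7:-1], None)
--         else:
--             uniques.setdefault(e, None)
--     out = list(uniques)
--     if returns:
--         out.append(" " * spaces + "return " + ", ".join(returns))
--     return out
-- ===== Notes on version B (the rewrite author's own statement) =====
-- stated objective: faster
-- what changed: B replaces A's global while-loop that re-substitutes the whole expression list each round (with a diffs flag) by a local per-expression fixpoint that stops as soon as that one expression is stable, and replaces the quadratic 'in list' dedup with insertion-ordered dicts and the spaces scan with a first-match generator.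
import Mathlib
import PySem

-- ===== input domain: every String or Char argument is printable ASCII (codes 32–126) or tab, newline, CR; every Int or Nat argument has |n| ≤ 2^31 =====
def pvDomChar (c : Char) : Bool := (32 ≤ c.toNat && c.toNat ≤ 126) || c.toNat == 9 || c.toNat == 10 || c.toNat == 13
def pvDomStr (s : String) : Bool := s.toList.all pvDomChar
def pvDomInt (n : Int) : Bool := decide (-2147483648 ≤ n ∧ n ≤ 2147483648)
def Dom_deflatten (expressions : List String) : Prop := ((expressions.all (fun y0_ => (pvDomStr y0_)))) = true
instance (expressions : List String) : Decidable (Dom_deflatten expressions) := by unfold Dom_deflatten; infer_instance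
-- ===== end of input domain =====

-- B replaces A's global substitute-all-expressions-until-nothing-changes while-loop by a local
-- per-expression fixpoint, and replaces the quadratic list-membership dedup by insertion-ordered
-- dicts and the starting-spaces loop by a first-match generator.

-- ===== PORT A =====
def pvValidSymbolsA : String := ".,!@#$%^/&*()-+={}[]:\t=<>`'\" "

-- _is_not_var_symbol (only ever called on single characters)
def pvIsNotVarSymbolA (text : String) : Bool :=
  if PySem.Str.isIn text pvValidSymbolsA then true else false

-- the for-loop of _deflatten, over the characters of expression + " "; state = (current_var, new_expression)
def pvDflA (d : PySem.Dict String String) : List Char → List Char → List Char → List Char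
  | [], _cur, acc => acc
  | c :: rest, cur, acc =>
    if pvIsNotVarSymbolA (String.ofList [c]) then
      pvDflA d rest [] (acc ++ (d.getD (String.ofList cur) (String.ofList cur)).toList ++ [c])
    else
      pvDflA d rest (cur ++ [c]) acc

-- _deflatten(expression, variable_expressions); new_expression[:-1] is dropLast (exact, also on "")
def pvDeflattenOneA (d : PySem.Dict String String) (e : String) : String :=
  String.ofList ((pvDflA d (e.toList ++ [' ']) [] []).dropLast)

-- _count_strarting_spaces with its only used tab=4
def pvCountStartA : List Char → Nat
  | [] => 0
  | c :: rest =>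
    if c = ' ' then pvCountStartA rest + 1
    else if c = '\t' then pvCountStartA rest + 4
    else 0

-- the classification loop building variable_expressions and kept_expressions
-- (split on the contained separator " <--> " always yields ≥ 2 parts, so the getD defaults are unreachable)
def pvClassifyA (expressions : List String) : PySem.Dict String String × List String :=
  expressions.foldl
    (fun st e =>
      if PySem.Str.isIn " <--> " e then
        let splt := (PySem.Str.split? e " <--> ").getD []
        (st.1.insert (splt.getD 0 "") (splt.getD 1 ""), st.2)
      else (st.1, st.2 ++ [e]))
    (PySem.Dict.empty, [])

-- the 'while True' fixpoint loop, fuel-bounded (when Python A terminates, it stabilizes within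
-- one round per defined variable, so fuel expressions.length + 1 reproduces it exactly)
def pvLoopA (d : PySem.Dict String String) : Nat → List String → List String
  | 0, kept => kept
  | fuel + 1, kept =>
    let next := kept.map (pvDeflattenOneA d)
    let diffs := (List.range next.length).any (fun i => kept.getD i "" != next.getD i "")
    if diffs then pvLoopA d fuel next else next

-- the starting-spaces scan (spaces keeps the count of the last examined expression)
def pvSpacesLoopA : List String → Nat → Nat
  | [], spaces => spaces
  | e :: rest, _ =>
    let s := pvCountStartA e.toList
    if s > 0 then s else pvSpacesLoopA rest s

-- the return_statements / unique_kept_expressions loop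
def pvDedupA (spaces : Nat) (kept : List String) : List String × List String :=
  kept.foldl
    (fun st e =>
      let stripped := PySem.Str.strip e
      if PySem.Str.startswith stripped "return(" && (pvCountStartA e.toList == spaces) then
        let r := PySem.Str.slice stripped (some 7) (some (-1))
        if st.1.contains r then st else (st.1 ++ [r], st.2)
      else if st.2.contains e then st else (st.1, st.2 ++ [e]))
    ([], [])

def deflatten (expressions : List String) : List String :=
  let cl := pvClassifyA expressions
  let d := cl.1
  let kept1 := cl.2.map (pvDeflattenOneA d)
  let kept := pvLoopA d (expressions.length + 1) kept1
  let spaces := pvSpacesLoopA kept 0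
  let du := pvDedupA spaces kept
  if du.1.length > 0 then
    du.2 ++ [String.ofList (List.replicate spaces ' ' ++ "return ".toList ++ (PySem.Str.join ", " du.1).toList)]
  else du.2

-- ===== PORT B =====
def pvSymbolsB : String := ".,!@#$%^/&*()-+={}[]:\t=<>`'\" "

-- _subst's loop: state = (tok, parts)
def pvSubstGoB (d : PySem.Dict String String) : List Char → List Char → List String → List String
  | [], tok, parts => parts ++ [d.getD (String.ofList tok) (String.ofList tok)]
  | c :: rest, tok, parts =>
    if PySem.Str.isIn (String.ofList [c]) pvSymbolsB then
      pvSubstGoB d rest [] (parts ++ [d.getD (String.ofList tok) (String.ofList tok), String.ofList [c]])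
    else
      pvSubstGoB d rest (tok ++ [c]) parts

def pvSubstB (d : PySem.Dict String String) (text : String) : String :=
  PySem.Str.join "" (pvSubstGoB d text.toList [] [])

-- _expand's 'while cur != prev' loop, fuel-bounded with the same fuel as port A's global loop
-- (when Python B terminates it stabilizes within one round per defined variable, so it is exact)
def pvExpandB (d : PySem.Dict String String) : Nat → String → String
  | 0, prev => pvSubstB d prev
  | fuel + 1, prev =>
    let cur := pvSubstB d prev
    if cur = prev then cur else pvExpandB d fuel cur

-- _indent with its only used tab=4
def pvIndentB : List Char → Nat
  | [] => 0
  | c :: rest =>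
    if c = ' ' then pvIndentB rest + 1
    else if c = '\t' then pvIndentB rest + 4
    else 0

-- the same classification loop as in Source B's deflatten
def pvClassifyB (expressions : List String) : PySem.Dict String String × List String :=
  expressions.foldl
    (fun st e =>
      if PySem.Str.isIn " <--> " e then
        let splt := (PySem.Str.split? e " <--> ").getD []
        (st.1.insert (splt.getD 0 "") (splt.getD 1 ""), st.2)
      else (st.1, st.2 ++ [e]))
    (PySem.Dict.empty, [])

-- next((n for n in (_indent(e) for e in kept) if n > 0), 0)
def pvSpacesB (kept : List String) : Nat :=
  (((kept.map (fun e => pvIndentB e.toList)).find? (fun n => decide (0 < n))).getD 0)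

-- the returns/uniques setdefault loop
def pvDedupB (spaces : Nat) (kept : List String) : PySem.Dict String Unit × PySem.Dict String Unit :=
  kept.foldl
    (fun st e =>
      let s := PySem.Str.strip e
      if PySem.Str.startswith s "return(" && (pvIndentB e.toList == spaces) then
        (st.1.setdefault (PySem.Str.slice s (some 7) (some (-1))) (), st.2)
      else (st.1, st.2.setdefault e ()))
    (PySem.Dict.empty, PySem.Dict.empty)

def deflatten_alt (expressions : List String) : List String :=
  let cl := pvClassifyB expressions
  let d := cl.1
  let kept := cl.2.map (pvExpandB d (expressions.length + 1))
  let spaces := pvSpacesB kept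
  let du := pvDedupB spaces kept
  if du.1.size > 0 then
    du.2.keys ++ [String.ofList (List.replicate spaces ' ' ++ "return ".toList ++ (PySem.Str.join ", " du.1.keys).toList)]
  else du.2.keys

-- ===== PRECONDITION & SPEC =====
def Spec_deflatten (expressions : List String) (out : List String) : Prop := out = deflatten_alt expressions
instance (expressions : List String) (out : List String) : Decidable (Spec_deflatten expressions out) := by unfold Spec_deflatten; infer_instance

-- ===== CLAIM (what is proved, stated in full; the proofs are below) =====
def Claim_equal_deflatten : Prop := ∀ (expressions : List String), Dom_deflatten expressions → Spec_deflatten expressions (deflatten expressions)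

-- ===== LEMMAS AND PROOFS =====

def pvSym (c : Char) : Bool := ".,!@#$%^/&*()-+={}[]:\t=<>`'\" ".toList.contains c

lemma pvSymA_eq (c : Char) : pvIsNotVarSymbolA (String.ofList [c]) = pvSym c := by
  have hiff : PySem.Chars.isIn [c] pvValidSymbolsA.toList = pvSym c := by
    rw [Bool.eq_iff_iff, PySem.Chars.isIn_iff_infix]
    simp [pvSym, pvValidSymbolsA, List.singleton_infix_iff]
  simp [pvIsNotVarSymbolA, hiff]

lemma pvSymB_eq (c : Char) : PySem.Str.isIn (String.ofList [c]) pvSymbolsB = pvSym c := by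
  have hiff : PySem.Chars.isIn [c] pvSymbolsB.toList = pvSym c := by
    rw [Bool.eq_iff_iff, PySem.Chars.isIn_iff_infix]
    simp [pvSym, pvSymbolsB, List.singleton_infix_iff]
  simp [hiff]

lemma pvDflA_acc2 (d : PySem.Dict String String) :
    ∀ cs cur acc1 acc2, pvDflA d cs cur (acc1 ++ acc2) = acc1 ++ pvDflA d cs cur acc2 := by
  intro cs
  induction cs with
  | nil => intro cur acc1 acc2; simp [pvDflA]
  | cons c rest ih =>
    intro cur acc1 acc2
    simp only [pvDflA]
    split_ifs with h
    · simpa [List.append_assoc] using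
        ih [] acc1 (acc2 ++ (d.getD (String.ofList cur) (String.ofList cur)).toList ++ [c])
    · exact ih (cur ++ [c]) acc1 acc2

lemma pvDflA_acc (d : PySem.Dict String String) (cs cur acc : List Char) :
    pvDflA d cs cur acc = acc ++ pvDflA d cs cur [] := by
  simpa using pvDflA_acc2 d cs cur acc []

lemma pvJoinNilChars : ∀ ls : List (List Char), PySem.Chars.join [] ls = ls.flatten := by
  intro ls
  induction ls with
  | nil => rfl
  | cons a t ih =>
    cases t with
    | nil => simp [PySem.Chars.join_singleton]
    | cons b r => rw [PySem.Chars.join_cons_cons]; simp_all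

lemma pvJoinEmpty (l : List String) : (PySem.Str.join "" l).toList = (l.map String.toList).flatten := by
  simp only [PySem.Str.toList_join, String.toList_empty]
  exact pvJoinNilChars _

-- B's _subst computes exactly A's _deflatten
lemma pvSubstGoB_chars (d : PySem.Dict String String) :
    ∀ cs tok parts, ((pvSubstGoB d cs tok parts).map String.toList).flatten ++ [' ']
      = ((parts.map String.toList).flatten) ++ pvDflA d (cs ++ [' ']) tok [] := by
  intro cs
  induction cs with
  | nil =>
    intro tok parts
    have hsp : pvIsNotVarSymbolA (String.ofList [' ']) = true := by rw [pvSymA_eq]; decide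
    simp [pvSubstGoB, pvDflA, hsp]
  | cons c rest ih =>
    intro tok parts
    simp only [pvSubstGoB, List.cons_append, pvDflA, pvSymA_eq, pvSymB_eq]
    by_cases hc : pvSym c = true
    · rw [if_pos hc, if_pos hc, ih]
      conv_rhs => rw [pvDflA_acc d (rest ++ [' ']) []
        ([] ++ (d.getD (String.ofList tok) (String.ofList tok)).toList ++ [c])]
      simp
    · rw [if_neg hc, if_neg hc, ih]

lemma pvSubstB_eq (d : PySem.Dict String String) (e : String) : pvSubstB d e = pvDeflattenOneA d e := by
  have hchars := pvSubstGoB_chars d e.toList [] []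
  simp only [List.map_nil, List.flatten_nil, List.nil_append] at hchars
  have h1 : (pvSubstB d e).toList = (pvDeflattenOneA d e).toList := by
    rw [pvSubstB, pvJoinEmpty, pvDeflattenOneA, String.toList_ofList, ← hchars]
    simp
  calc pvSubstB d e = String.ofList (pvSubstB d e).toList := by simp
    _ = String.ofList (pvDeflattenOneA d e).toList := by rw [h1]
    _ = pvDeflattenOneA d e := by simp

lemma pvClassify_eq (es : List String) : pvClassifyB es = pvClassifyA es := rfl

-- the common iterate of the substitution map, proof-side only
def pvIt (d : PySem.Dict String String) : Nat → String → String
  | 0, e => e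
  | k + 1, e => pvDeflattenOneA d (pvIt d k e)

lemma pvIt_comm (d : PySem.Dict String String) :
    ∀ k e, pvIt d k (pvDeflattenOneA d e) = pvIt d (k + 1) e := by
  intro k
  induction k with
  | zero => intro e; rfl
  | succ k ih => intro e; simp only [pvIt, ih]

lemma pvIt_stable (d : PySem.Dict String String) {e : String}
    (h : pvDeflattenOneA d e = e) : ∀ k, pvIt d k e = e := by
  intro k
  induction k with
  | zero => rfl
  | succ k ih => simp only [pvIt, ih, h]

-- B's per-expression loop computes the (fuel+1)-st iterate (stability freezes the value)
lemma pvExpandB_eq_it (d : PySem.Dict String String) :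
    ∀ fuel e, pvExpandB d fuel e = pvIt d (fuel + 1) e := by
  intro fuel
  induction fuel with
  | zero => intro e; simp [pvExpandB, pvIt, pvSubstB_eq]
  | succ fuel ih =>
    intro e
    simp only [pvExpandB, pvSubstB_eq]
    by_cases h : pvDeflattenOneA d e = e
    · rw [if_pos h, h, pvIt_stable d h]
    · rw [if_neg h, ih, pvIt_comm]

-- A's global loop computes the (fuel+1)-st iterate of every element (stability freezes values)
lemma pvLoopA_eq_it (d : PySem.Dict String String) :
    ∀ fuel (l : List String), pvLoopA d fuel (l.map (pvDeflattenOneA d)) = l.map (pvIt d (fuel + 1)) := by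
  intro fuel
  induction fuel with
  | zero =>
    intro l
    simp only [pvLoopA]
    exact List.map_congr_left fun e _ => rfl
  | succ fuel ih =>
    intro l
    simp only [pvLoopA]
    have hnext : (l.map (pvDeflattenOneA d)).map (pvDeflattenOneA d)
        = (l.map (pvDeflattenOneA d)).map (pvDeflattenOneA d) := rfl
    by_cases hdiffs : ((List.range ((l.map (pvDeflattenOneA d)).map (pvDeflattenOneA d)).length).any
        (fun i => (l.map (pvDeflattenOneA d)).getD i "" != ((l.map (pvDeflattenOneA d)).map (pvDeflattenOneA d)).getD i "")) = true
    · rw [if_pos hdiffs]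
      have := ih (l.map (pvDeflattenOneA d))
      rw [this, List.map_map]
      exact List.map_congr_left fun e _ => pvIt_comm d (fuel + 1) e
    · rw [if_neg hdiffs]
      -- no element changed: every element is stable after the first pass
      have hstable : ∀ e ∈ l, pvDeflattenOneA d (pvDeflattenOneA d e) = pvDeflattenOneA d e := by
        intro e he
        obtain ⟨i, hi, hei⟩ := List.mem_iff_getElem.mp he
        rw [Bool.not_eq_true, List.any_eq_false] at hdiffs
        have hmem : i ∈ List.range ((l.map (pvDeflattenOneA d)).map (pvDeflattenOneA d)).length := by
          simp [hi]
        have := hdiffs i hmem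
        simp only [bne_iff_ne, ne_eq, not_not] at this
        have h1 : (l.map (pvDeflattenOneA d)).getD i "" = pvDeflattenOneA d e := by
          rw [List.getD_eq_getElem _ _ (by simpa using hi)]
          simp [hei]
        have h2 : ((l.map (pvDeflattenOneA d)).map (pvDeflattenOneA d)).getD i ""
            = pvDeflattenOneA d (pvDeflattenOneA d e) := by
          rw [List.getD_eq_getElem _ _ (by simpa using hi)]
          simp [hei]
        rw [h1, h2] at this
        exact this.symm
      rw [List.map_map]
      exact List.map_congr_left fun e he => by
        have hs := hstable e he
        calc pvDeflattenOneA d (pvDeflattenOneA d e) = pvDeflattenOneA d e := hs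
          _ = pvIt d (fuel + 1 + 1) e := by
              rw [show pvIt d (fuel + 1 + 1) e = pvIt d (fuel + 1) (pvDeflattenOneA d e) from (pvIt_comm d _ e).symm,
                pvIt_stable d hs]

lemma pvCount_eq_indent : ∀ cs : List Char, pvCountStartA cs = pvIndentB cs := by
  intro cs
  induction cs with
  | nil => rfl
  | cons c rest ih => simp only [pvCountStartA, pvIndentB, ih]

lemma pvSpaces_eq : ∀ kept : List String, pvSpacesLoopA kept 0 = pvSpacesB kept := by
  intro kept
  induction kept with
  | nil => rfl
  | cons e rest ih =>
    simp only [pvSpacesLoopA, pvSpacesB, List.map_cons, List.find?_cons, pvCount_eq_indent]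
    by_cases hs : pvIndentB e.toList > 0
    · simp [hs]
    · have h0 : pvIndentB e.toList = 0 := by omega
      rw [h0]
      simpa [pvSpacesB] using ih

def pvDedupAFrom (spaces : Nat) (st : List String × List String) (kept : List String) :
    List String × List String :=
  kept.foldl
    (fun st e =>
      let stripped := PySem.Str.strip e
      if PySem.Str.startswith stripped "return(" && (pvCountStartA e.toList == spaces) then
        let r := PySem.Str.slice stripped (some 7) (some (-1))
        if st.1.contains r then st else (st.1 ++ [r], st.2)
      else if st.2.contains e then st else (st.1, st.2 ++ [e]))
    st

def pvDedupBFrom (spaces : Nat) (st : PySem.Dict String Unit × PySem.Dict String Unit)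
    (kept : List String) : PySem.Dict String Unit × PySem.Dict String Unit :=
  kept.foldl
    (fun st e =>
      let s := PySem.Str.strip e
      if PySem.Str.startswith s "return(" && (pvIndentB e.toList == spaces) then
        (st.1.setdefault (PySem.Str.slice s (some 7) (some (-1))) (), st.2)
      else (st.1, st.2.setdefault e ()))
    st

lemma pvDedup_aux (spaces : Nat) :
    ∀ (kept : List String) (rl ul : List String) (rd ud : PySem.Dict String Unit),
      rd.keys = rl → ud.keys = ul →
      (pvDedupBFrom spaces (rd, ud) kept).1.keys = (pvDedupAFrom spaces (rl, ul) kept).1 ∧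
      (pvDedupBFrom spaces (rd, ud) kept).2.keys = (pvDedupAFrom spaces (rl, ul) kept).2 := by
  intro kept
  induction kept with
  | nil => intro rl ul rd ud h1 h2; exact ⟨h1, h2⟩
  | cons e rest ih =>
    intro rl ul rd ud h1 h2
    simp only [pvDedupAFrom, pvDedupBFrom, List.foldl_cons, pvCount_eq_indent] at ih ⊢
    by_cases hcond : (PySem.Str.startswith (PySem.Str.strip e) "return(" && (pvIndentB e.toList == spaces)) = true
    · simp only [if_pos hcond]
      by_cases hmem : rd.contains (PySem.Str.slice (PySem.Str.strip e) (some 7) (some (-1))) = true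
      · have hcl : rl.contains (PySem.Str.slice (PySem.Str.strip e) (some 7) (some (-1))) = true := by
          rw [← h1]
          simpa [List.contains_iff_mem] using (PySem.Dict.contains_iff_mem_keys rd _).mp hmem
        rw [PySem.Dict.setdefault_of_contains _ _ hmem]
        simp only [hcl]
        exact ih rl ul rd ud h1 h2
      · have hcl : rl.contains (PySem.Str.slice (PySem.Str.strip e) (some 7) (some (-1))) = false := by
          rw [Bool.eq_false_iff]
          intro hc
          refine hmem ((PySem.Dict.contains_iff_mem_keys rd _).mpr ?_)
          rw [h1]
          simpa [List.contains_iff_mem] using hc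
        rw [PySem.Dict.setdefault_of_not_contains _ _ (by simp [hmem])]
        simp only [hcl]
        simp only [Bool.false_eq_true, if_false]
        exact ih (rl ++ [PySem.Str.slice (PySem.Str.strip e) (some 7) (some (-1))]) ul _ ud
          (by rw [PySem.Dict.keys_insert_of_not_contains _ _ (by simp [hmem]), h1]) h2
    · simp only [Bool.not_eq_true] at hcond
      simp only [hcond, Bool.false_eq_true, if_false]
      by_cases hmem : ud.contains e = true
      · have hcl : ul.contains e = true := by
          rw [← h2]
          simpa [List.contains_iff_mem] using (PySem.Dict.contains_iff_mem_keys ud e).mp hmem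
        rw [PySem.Dict.setdefault_of_contains _ _ hmem]
        simp only [hcl]
        exact ih rl ul rd ud h1 h2
      · have hcl : ul.contains e = false := by
          rw [Bool.eq_false_iff]
          intro hc
          refine hmem ((PySem.Dict.contains_iff_mem_keys ud e).mpr ?_)
          rw [h2]
          simpa [List.contains_iff_mem] using hc
        rw [PySem.Dict.setdefault_of_not_contains _ _ (by simp [hmem])]
        simp only [hcl, Bool.false_eq_true, if_false]
        exact ih rl (ul ++ [e]) rd _ h1
          (by rw [PySem.Dict.keys_insert_of_not_contains _ _ (by simp [hmem]), h2])

lemma pvDedup_eq (spaces : Nat) (kept : List String) :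
    (pvDedupB spaces kept).1.keys = (pvDedupA spaces kept).1 ∧
    (pvDedupB spaces kept).2.keys = (pvDedupA spaces kept).2 := by
  have h := pvDedup_aux spaces kept [] [] PySem.Dict.empty PySem.Dict.empty
    (by simp [PySem.Dict.empty, PySem.Dict.keys]) (by simp [PySem.Dict.empty, PySem.Dict.keys])
  exact h

lemma pvDictSize_keys (d : PySem.Dict String Unit) : d.size = d.keys.length := by
  simp [PySem.Dict.size, PySem.Dict.keys]

theorem deflatten_spec : Claim_equal_deflatten := by
  intro es _hdom
  show deflatten es = deflatten_alt es
  simp only [deflatten, deflatten_alt]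
  rw [pvClassify_eq]
  rw [pvLoopA_eq_it]
  have hkept : (pvClassifyA es).2.map (pvExpandB (pvClassifyA es).1 (es.length + 1))
      = (pvClassifyA es).2.map (pvIt (pvClassifyA es).1 (es.length + 1 + 1)) :=
    List.map_congr_left fun e _ => pvExpandB_eq_it _ _ e
  rw [hkept]
  rw [← pvSpaces_eq]
  obtain ⟨h1, h2⟩ := pvDedup_eq
    (pvSpacesLoopA ((pvClassifyA es).2.map (pvIt (pvClassifyA es).1 (es.length + 1 + 1))) 0)
    ((pvClassifyA es).2.map (pvIt (pvClassifyA es).1 (es.length + 1 + 1)))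
  rw [h1, h2, pvDictSize_keys, h1]
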